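-- pv_equiv track=rewrite | github.com/KazumaProject/neural-kana-kanji-converter | infer_seg.py | apply_min_max_len
-- ===== SOURCE A (Python) =====
-- from typing import List, Tuple
--
-- def apply_min_max_len(s: str, boundaries: List[int], min_len: int, max_len: int) -> List[int]:
--     """
--     boundaries: list of split offsets in [1, len(s)-1]
--     Post-process:
--       - enforce max_len by inserting extra splits
--       - enforce min_len by removing too-close splits (greedy)
--     """
--     n = len(s)
--     if n <= 1:
--         return []
--
--     # 1) enforce max_len
--     splits = sorted(set([b for b in boundaries if 1 <= b <= n - 1]))
--     out: List[int] = []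
--     prev = 0
--     for b in splits + [n]:
--         while b - prev > max_len:
--             prev2 = prev + max_len
--             out.append(prev2)
--             prev = prev2
--         if b != n:
--             out.append(b)
--             prev = b
--         else:
--             prev = b
--
--     # 2) enforce min_len (greedy)
--     out2: List[int] = []
--     prev = 0
--     for b in out:
--         if b - prev < min_len:
--             continue
--         out2.append(b)
--         prev = b
--
--     # also check tail segment
--     if out2:
--         last = out2[-1]
--         if n - last < min_len:
--             out2 = out2[:-1]
--
--     return out2
-- ===== SOURCE B (Python) =====
-- from typing import List
--
-- def apply_min_max_len(s: str, boundaries: List[int], min_len: int, max_len: int) -> List[int]: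
--     # Candidates built once as closed-form arithmetic ranges over pairwise gaps
--     # (no running-prev while loop), then kept splits found by binary-search jumps
--     # over the sorted candidate list instead of a linear greedy scan.
--     n = len(s)
--     if n <= 1:
--         return []
--     pts = [0] + sorted({b for b in boundaries if 1 <= b <= n - 1}) + [n]
--     cands = [c
--              for p, b in zip(pts, pts[1:])
--              for c in list(range(p + max_len, b, max_len)) + ([b] if b != n else [])]
--     m = len(cands)
--     res: List[int] = []
--     prev = 0
--     i = 0
--     while i < m:
--         # first index in [i, m) whose candidate is >= prev + min_len (cands is sorted)
--         t = prev + min_len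
--         lo, hi = i, m
--         while lo < hi:
--             mid = (lo + hi) // 2
--             if cands[mid] < t:
--                 lo = mid + 1
--             else:
--                 hi = mid
--         if lo == m:
--             break
--         prev = cands[lo]
--         res.append(prev)
--         i = lo + 1
--     if res and n - res[-1] < min_len:
--         res.pop()
--     return res
-- ===== Notes on version B (the rewrite author's own statement) =====
-- stated objective: alternative
-- what changed: A's running-prev while-loop insertion pass is replaced by closed-form arithmetic ranges over zip(pts, pts[1:]) gap pairs, and A's linear greedy min_len scan is replaced by binary-search jumps to the next candidate >= prev+min_len in the sorted candidate list.
import Mathlib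
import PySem

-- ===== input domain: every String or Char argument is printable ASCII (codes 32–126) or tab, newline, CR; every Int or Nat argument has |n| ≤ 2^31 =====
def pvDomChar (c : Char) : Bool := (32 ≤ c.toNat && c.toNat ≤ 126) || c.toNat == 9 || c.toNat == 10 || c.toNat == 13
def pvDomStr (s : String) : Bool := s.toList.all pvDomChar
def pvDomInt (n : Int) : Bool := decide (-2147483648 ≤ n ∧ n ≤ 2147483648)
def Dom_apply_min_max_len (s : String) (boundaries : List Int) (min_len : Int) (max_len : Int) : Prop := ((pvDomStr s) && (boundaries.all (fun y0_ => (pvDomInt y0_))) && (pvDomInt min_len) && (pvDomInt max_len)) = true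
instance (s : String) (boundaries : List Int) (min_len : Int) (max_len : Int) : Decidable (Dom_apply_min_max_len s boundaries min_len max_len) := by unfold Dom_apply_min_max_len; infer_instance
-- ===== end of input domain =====

-- B replaces A's running-prev insertion loop by closed-form per-gap ranges and A's
-- linear greedy min_len scan by binary-search jumps over the sorted candidate list
-- (objective: alternative, same asymptotic cost); the return value only is compared
-- (neither version mutates its arguments observably).

-- ===== PORT A =====
-- the inner 'while b - prev > max_len' loop; fuel is only a totality guard
-- (under Pre_, 1 ≤ max_len, the fuel (b - prev).toNat always suffices)
def pvWhileA (max_len b : Int) : Nat → List Int × Int → List Int × Int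
  | 0, st => st
  | fuel + 1, st =>
      if b - st.2 > max_len then
        pvWhileA max_len b fuel (st.1 ++ [st.2 + max_len], st.2 + max_len)
      else st

-- one iteration of A's first 'for b in splits + [n]' loop, state = (out, prev)
def pvStepA (n max_len : Int) (st : List Int × Int) (b : Int) : List Int × Int :=
  let st' := pvWhileA max_len b (b - st.2).toNat st
  if b ≠ n then (st'.1 ++ [b], b) else (st'.1, b)

-- one iteration of A's second 'for b in out' loop, state = (out2, prev)
def pvStepMinA (min_len : Int) (st : List Int × Int) (b : Int) : List Int × Int :=
  if b - st.2 < min_len then st else (st.1 ++ [b], b)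

def apply_min_max_len (s : String) (boundaries : List Int) (min_len : Int) (max_len : Int) : List Int :=
  let n : Int := PySem.Str.len s
  if n ≤ 1 then []
  else
    let splits := PySem.List.sorted (PySem.Set.ofList (boundaries.filter (fun b => decide (1 ≤ b ∧ b ≤ n - 1)))) (fun x => x)
    let out := ((splits ++ [n]).foldl (pvStepA n max_len) ([], 0)).1
    let out2 := (out.foldl (pvStepMinA min_len) ([], 0)).1
    -- out2[-1] / out2[:-1] on a checked-nonempty list, ported as getLast? / dropLast (exact)
    match out2.getLast? with
    | none => out2
    | some last => if n - last < min_len then out2.dropLast else out2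

-- ===== PORT B =====
-- B's inner 'while lo < hi' binary search (hand-written in Source B, transcribed step for
-- step; cands[mid] is always in range, ported as getD; fuel hi-lo is a totality guard)
def pvBisect (cands : List Int) (t : Int) : Nat → Nat → Nat → Nat
  | 0, lo, _ => lo
  | fuel + 1, lo, hi =>
      if lo < hi then
        let mid := (lo + hi) / 2
        if cands.getD mid 0 < t then pvBisect cands t fuel (mid + 1) hi
        else pvBisect cands t fuel lo mid
      else lo

-- B's outer 'while i < m' jump loop, state = (res, prev, i); fuel m+1 is a totality guard
def pvOuter (min_len : Int) (cands : List Int) : Nat → List Int → Int → Nat → List Int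
  | 0, res, _, _ => res
  | fuel + 1, res, prev, i =>
      if i < cands.length then
        let lo := pvBisect cands (prev + min_len) (cands.length - i) i cands.length
        if lo = cands.length then res
        else pvOuter min_len cands fuel (res ++ [cands.getD lo 0]) (cands.getD lo 0) (lo + 1)
      else res

def apply_min_max_len_alt (s : String) (boundaries : List Int) (min_len : Int) (max_len : Int) : List Int :=
  let n : Int := PySem.Str.len s
  if n ≤ 1 then []
  else
    let pts := 0 :: (PySem.List.sorted (PySem.Set.ofList (boundaries.filter (fun x => decide (1 ≤ x ∧ x ≤ n - 1)))) (fun x => x) ++ [n])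
    -- the comprehension over zip(pts, pts[1:])
    let cands := (pts.zip (pts.drop 1)).flatMap (fun pb => PySem.List.pyRange (pb.1 + max_len) pb.2 max_len ++ (if pb.2 ≠ n then [pb.2] else []))
    let res := pvOuter min_len cands (cands.length + 1) [] 0 0
    match res.getLast? with
    | none => res
    | some last => if n - last < min_len then res.dropLast else res

-- ===== PRECONDITION & SPEC =====
-- Pre_ excludes max_len ≤ 0 with len(s) > 1, on which A's 'while' never makes
-- progress and A loops forever (it returns no value there).
def Pre_apply_min_max_len (s : String) (boundaries : List Int) (min_len : Int) (max_len : Int) : Prop :=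
  PySem.Str.len s ≤ 1 ∨ 1 ≤ max_len
instance (s : String) (boundaries : List Int) (min_len : Int) (max_len : Int) : Decidable (Pre_apply_min_max_len s boundaries min_len max_len) := by unfold Pre_apply_min_max_len; infer_instance

def pvWitness_apply_min_max_len : String × List Int × Int × Int := ("abcdefgh", [2, 5], 2, 3)

def Spec_apply_min_max_len (s : String) (boundaries : List Int) (min_len : Int) (max_len : Int) (out : List Int) : Prop := out = apply_min_max_len_alt s boundaries min_len max_len
instance (s : String) (boundaries : List Int) (min_len : Int) (max_len : Int) (out : List Int) : Decidable (Spec_apply_min_max_len s boundaries min_len max_len out) := by unfold Spec_apply_min_max_len; infer_instance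

-- ===== CLAIM (what is proved, stated in full; the proofs are below) =====
def Claim_equal_apply_min_max_len : Prop := ∀ (s : String) (boundaries : List Int) (min_len : Int) (max_len : Int), Dom_apply_min_max_len s boundaries min_len max_len → Pre_apply_min_max_len s boundaries min_len max_len → Spec_apply_min_max_len s boundaries min_len max_len (apply_min_max_len s boundaries min_len max_len)

-- ===== LEMMAS AND PROOFS =====

-- the per-boundary candidate block: the splits A's while loop inserts, then b (unless b = n)
def pvG (n max_len : Int) : Int → List Int → List Int
  | _, [] => []
  | p, b :: rest =>
      (PySem.List.pyRange (p + max_len) b max_len ++ (if b ≠ n then [b] else [])) ++ pvG n max_len b rest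

theorem pyRange_pos_nil (a b s : Int) (hs : 0 < s) (h : b ≤ a) :
    PySem.List.pyRange a b s = [] := by
  rw [PySem.List.pyRange_of_pos a b hs]
  simp [show ¬ a < b by omega]

theorem pyRange_pos_cons (a b s : Int) (hs : 0 < s) (h : a < b) :
    PySem.List.pyRange a b s = a :: PySem.List.pyRange (a + s) b s := by
  rw [PySem.List.pyRange_of_pos a b hs, PySem.List.pyRange_of_pos (a + s) b hs]
  have hnum : b - a + s - 1 = (b - (a + s) + s - 1) + 1 * s := by ring
  have hdiv : (b - a + s - 1) / s = (b - (a + s) + s - 1) / s + 1 := by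
    rw [hnum, Int.add_mul_ediv_right _ _ (by omega : s ≠ 0)]
  by_cases h2 : a + s < b
  · have hge : 0 ≤ (b - (a + s) + s - 1) / s := Int.ediv_nonneg (by omega) (by omega)
    rw [if_pos h, if_pos h2, hdiv]
    have : ((b - (a + s) + s - 1) / s + 1).toNat = ((b - (a + s) + s - 1) / s).toNat + 1 := by omega
    rw [this, List.range_succ_eq_map, List.map_cons, List.map_map]
    refine congrArg₂ _ (by ring) (List.map_congr_left fun k _ => ?_)
    simp [Function.comp]; ring
  · have hq0 : (b - (a + s) + s - 1) / s = 0 := by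
      apply Int.ediv_eq_zero_of_lt <;> omega
    rw [if_pos h, if_neg h2, hdiv, hq0]
    simp

theorem pvWhileA_fst (max_len b : Int) (hm : 1 ≤ max_len) :
    ∀ (fuel : Nat) (st : List Int × Int), (b - st.2).toNat ≤ fuel →
      (pvWhileA max_len b fuel st).1 = st.1 ++ PySem.List.pyRange (st.2 + max_len) b max_len := by
  intro fuel
  induction fuel with
  | zero =>
      intro st h
      have : b ≤ st.2 := by omega
      rw [pvWhileA, pyRange_pos_nil _ _ _ (by omega) (by omega)]
      simp
  | succ f ih =>
      intro st h
      rw [pvWhileA]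
      by_cases hc : b - st.2 > max_len
      · rw [if_pos hc, ih _ (by simp; omega)]
        rw [pyRange_pos_cons (st.2 + max_len) b max_len (by omega) (by omega)]
        simp
      · rw [if_neg hc, pyRange_pos_nil _ _ _ (by omega) (by omega)]
        simp

theorem foldl_stepA (n max_len : Int) (hm : 1 ≤ max_len) :
    ∀ (l : List Int) (out0 : List Int) (p0 : Int),
      (l.foldl (pvStepA n max_len) (out0, p0)).1 = out0 ++ pvG n max_len p0 l := by
  intro l
  induction l with
  | nil => intro out0 p0; simp [pvG]
  | cons b rest ih =>
      intro out0 p0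
      have hstep : pvStepA n max_len (out0, p0) b =
          (out0 ++ (PySem.List.pyRange (p0 + max_len) b max_len ++ (if b ≠ n then [b] else [])), b) := by
        simp only [pvStepA]
        rw [pvWhileA_fst max_len b hm ((b - (out0, p0).2).toNat) (out0, p0) (le_refl _)]
        by_cases hb : b ≠ n <;> simp [hb]
      rw [List.foldl_cons, hstep, ih]
      simp [pvG]

-- B's zip-pairwise comprehension generates exactly the same candidate chain pvG
theorem zip_flatMap_eq_pvG (n max_len : Int) :
    ∀ (l : List Int) (p : Int),
      (((p :: l).zip ((p :: l).drop 1)).flatMap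
        (fun pb => PySem.List.pyRange (pb.1 + max_len) pb.2 max_len ++ (if pb.2 ≠ n then [pb.2] else [])))
      = pvG n max_len p l := by
  intro l
  induction l with
  | nil => intro p; simp [pvG]
  | cons b rest ih =>
      intro p
      simp only [List.drop_one, List.tail_cons, List.zip_cons_cons, List.flatMap_cons]
      rw [show ((b :: rest).zip rest) = ((b :: rest).zip ((b :: rest).drop 1)) by simp,
          ih b]
      simp [pvG]

-- pyRange with a positive step is strictly increasing
theorem pyRange_pos_pairwise (a b s : Int) (hs : 0 < s) :
    (PySem.List.pyRange a b s).Pairwise (· < ·) := by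
  rw [PySem.List.pyRange_of_pos a b hs, List.pairwise_map]
  refine List.Pairwise.imp ?_ List.pairwise_lt_range
  intro j k hjk
  have : s * (j : Int) < s * (k : Int) := by
    have : (j : Int) < (k : Int) := by exact_mod_cast hjk
    exact mul_lt_mul_of_pos_left this hs
  omega

-- the candidate chain is strictly increasing and bounded below by its start point
theorem pvG_sorted (n max_len : Int) (hm : 1 ≤ max_len) :
    ∀ (l : List Int) (p : Int), List.Pairwise (· < ·) (p :: l) →
      (pvG n max_len p l).Pairwise (· < ·) ∧ ∀ x ∈ pvG n max_len p l, p < x := by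
  intro l
  induction l with
  | nil => intro p _; simp [pvG]
  | cons b rest ih =>
      intro p hp
      have hpb : p < b := (List.pairwise_cons.mp hp).1 b (by simp)
      have hrest : List.Pairwise (· < ·) (b :: rest) := (List.pairwise_cons.mp hp).2
      obtain ⟨ihp, ihm⟩ := ih b hrest
      have hrng : ∀ x ∈ PySem.List.pyRange (p + max_len) b max_len, p + max_len ≤ x ∧ x < b := by
        intro x hx
        have := (PySem.List.mem_pyRange_iff_of_pos (by omega) x).mp hx
        exact ⟨this.1, this.2.1⟩
      have hblk : ∀ x ∈ (PySem.List.pyRange (p + max_len) b max_len ++ (if b ≠ n then [b] else [])),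
          p < x ∧ x ≤ b := by
        intro x hx
        rcases List.mem_append.mp hx with hx | hx
        · have := hrng x hx; omega
        · have : x = b := by
            by_cases hb : b ≠ n <;> simp [hb] at hx <;> omega
          omega
      have hblkp : (PySem.List.pyRange (p + max_len) b max_len ++ (if b ≠ n then [b] else [])).Pairwise (· < ·) := by
        refine List.pairwise_append.mpr ⟨pyRange_pos_pairwise _ _ _ (by omega), ?_, ?_⟩
        · by_cases hb : b ≠ n <;> simp [hb]
        · intro x hx y hy
          have hxb := (hrng x hx).2
          have : y = b := by
            by_cases hb : b ≠ n <;> simp [hb] at hy <;> omega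
          omega
      constructor
      · rw [pvG]
        refine List.pairwise_append.mpr ⟨hblkp, ihp, ?_⟩
        intro x hx y hy
        have := (hblk x hx).2
        have := ihm y hy
        omega
      · rw [pvG]
        intro x hx
        rcases List.mem_append.mp hx with hx | hx
        · exact (hblk x hx).1
        · have := ihm x hx; omega

-- binary search: first index in [lo, hi) whose value is ≥ t, on a strictly increasing list
theorem pvBisect_spec (cands : List Int) (t : Int)
    (hmono : ∀ j k : Nat, j < k → k < cands.length → cands.getD j 0 < cands.getD k 0) :
    ∀ (fuel lo hi : Nat), hi ≤ cands.length → lo ≤ hi → hi - lo ≤ fuel →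
      lo ≤ pvBisect cands t fuel lo hi ∧ pvBisect cands t fuel lo hi ≤ hi ∧
      (∀ k, lo ≤ k → k < pvBisect cands t fuel lo hi → cands.getD k 0 < t) ∧
      (pvBisect cands t fuel lo hi < hi → t ≤ cands.getD (pvBisect cands t fuel lo hi) 0) := by
  intro fuel
  induction fuel with
  | zero =>
      intro lo hi hhi hlo hf
      have : lo = hi := by omega
      rw [pvBisect]
      exact ⟨le_refl _, by omega, by omega, by omega⟩
  | succ f ih =>
      intro lo hi hhi hlo hf
      rw [pvBisect]
      by_cases hlt : lo < hi
      · rw [if_pos hlt]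
        have hmidlo : lo ≤ (lo + hi) / 2 := by omega
        have hmidhi : (lo + hi) / 2 < hi := by omega
        by_cases hc : cands.getD ((lo + hi) / 2) 0 < t
        · rw [if_pos hc]
          obtain ⟨h1, h2, h3, h4⟩ := ih ((lo + hi) / 2 + 1) hi hhi (by omega) (by omega)
          refine ⟨by omega, h2, ?_, h4⟩
          intro k hk1 hk2
          by_cases hkm : k < (lo + hi) / 2
          · calc cands.getD k 0 < cands.getD ((lo + hi) / 2) 0 := hmono k _ hkm (by omega)
              _ < t := hc
          · by_cases hkm2 : k = (lo + hi) / 2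
            · rw [hkm2]; exact hc
            · exact h3 k (by omega) hk2
        · rw [if_neg hc]
          obtain ⟨h1, h2, h3, h4⟩ := ih lo ((lo + hi) / 2) (by omega) hmidlo (by omega)
          refine ⟨h1, by omega, h3, ?_⟩
          intro _
          by_cases hr : pvBisect cands t f lo ((lo + hi) / 2) < (lo + hi) / 2
          · exact h4 hr
          · have : pvBisect cands t f lo ((lo + hi) / 2) = (lo + hi) / 2 := by omega
            rw [this]; omega
      · rw [if_neg hlt]
        exact ⟨le_refl _, by omega, by omega, by omega⟩

-- skipping candidates below the threshold leaves the greedy fold's state unchanged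
theorem foldl_skip (min_len : Int) (cands : List Int) (res : List Int) (prev : Int) :
    ∀ (d j : Nat), j + d ≤ cands.length →
      (∀ idx, j ≤ idx → idx < j + d → cands.getD idx 0 < prev + min_len) →
      ((cands.drop j).foldl (pvStepMinA min_len) (res, prev))
        = ((cands.drop (j + d)).foldl (pvStepMinA min_len) (res, prev)) := by
  intro d
  induction d with
  | zero => intro j _ _; rfl
  | succ e ih =>
      intro j hlen hbelow
      have hj : j < cands.length := by omega
      rw [List.drop_eq_getElem_cons hj, List.foldl_cons]
      have hlt : cands[j] - prev < min_len := by
        have := hbelow j (le_refl _) (by omega)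
        rw [List.getD_eq_getElem cands 0 hj] at this
        omega
      rw [show pvStepMinA min_len (res, prev) cands[j] = (res, prev) by
            simp [pvStepMinA, hlt]]
      rw [show j + (e + 1) = (j + 1) + e by omega]
      exact ih (j + 1) (by omega) (fun idx h1 h2 => hbelow idx (by omega) (by omega))

-- B's binary-search jump loop computes A's greedy left-to-right filter
theorem pvOuter_eq (min_len : Int) (cands : List Int)
    (hmono : ∀ j k : Nat, j < k → k < cands.length → cands.getD j 0 < cands.getD k 0) :
    ∀ (fuel i : Nat) (res : List Int) (prev : Int), cands.length - i < fuel →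
      pvOuter min_len cands fuel res prev i
        = ((cands.drop i).foldl (pvStepMinA min_len) (res, prev)).1 := by
  intro fuel
  induction fuel with
  | zero => intro i res prev h; omega
  | succ f ih =>
      intro i res prev hf
      rw [pvOuter]
      by_cases hi : i < cands.length
      · rw [if_pos hi]
        obtain ⟨h1, h2, h3, h4⟩ := pvBisect_spec cands (prev + min_len) hmono
          (cands.length - i) i cands.length (le_refl _) (by omega) (le_refl _)
        by_cases hlo : pvBisect cands (prev + min_len) (cands.length - i) i cands.length = cands.length
        · rw [if_pos hlo]
          rw [foldl_skip min_len cands res prev (cands.length - i) i (by omega)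
                (fun idx ha hb => h3 idx ha (by omega))]
          rw [show i + (cands.length - i) = cands.length by omega,
              List.drop_eq_nil_of_le (le_refl _)]
          rfl
        · rw [if_neg hlo]
          set lo := pvBisect cands (prev + min_len) (cands.length - i) i cands.length with hlodef
          have hlolen : lo < cands.length := by omega
          rw [foldl_skip min_len cands res prev (lo - i) i (by omega)
                (fun idx ha hb => h3 idx ha (by omega))]
          rw [show i + (lo - i) = lo by omega]
          rw [List.drop_eq_getElem_cons hlolen, List.foldl_cons]
          have hge : ¬ (cands[lo] - prev < min_len) := by
            have := h4 hlolen
            rw [List.getD_eq_getElem cands 0 hlolen] at this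
            omega
          rw [show pvStepMinA min_len (res, prev) cands[lo] = (res ++ [cands[lo]], cands[lo]) by
                simp [pvStepMinA, hge]]
          rw [ih (lo + 1) (res ++ [cands.getD lo 0]) (cands.getD lo 0) (by omega)]
          rw [List.getD_eq_getElem cands 0 hlolen]
      · rw [if_neg hi, List.drop_eq_nil_of_le (by omega)]
        rfl

-- ===== VERDICT (by name: the statement is the Claim_ definition above) =====
theorem apply_min_max_len_spec : Claim_equal_apply_min_max_len := by
  intro s boundaries min_len max_len _hdom hpre
  unfold Spec_apply_min_max_len
  simp only [apply_min_max_len, apply_min_max_len_alt]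
  by_cases hn : PySem.Str.len s ≤ 1
  · simp only [if_pos hn]
  · have hm : 1 ≤ max_len := by
      rcases hpre with h | h
      · exact absurd h hn
      · exact h
    simp only [if_neg hn]
    set n := PySem.Str.len s with hndef
    set splits := PySem.List.sorted (PySem.Set.ofList (boundaries.filter (fun b => decide (1 ≤ b ∧ b ≤ n - 1)))) (fun x => x) with hsdef
    -- both candidate sequences are the chain pvG n max_len 0 (splits ++ [n])
    have hA : (((splits ++ [n]).foldl (pvStepA n max_len) ([], 0)).1 : List Int)
        = pvG n max_len 0 (splits ++ [n]) := by
      rw [foldl_stepA n max_len hm]; simp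
    have hB : (((0 :: (splits ++ [n])).zip ((0 :: (splits ++ [n])).drop 1)).flatMap
        (fun pb => PySem.List.pyRange (pb.1 + max_len) pb.2 max_len ++ (if pb.2 ≠ n then [pb.2] else [])))
        = pvG n max_len 0 (splits ++ [n]) := zip_flatMap_eq_pvG n max_len (splits ++ [n]) 0
    -- the chain is strictly increasing
    have hmem : ∀ x ∈ splits, 1 ≤ x ∧ x ≤ n - 1 := by
      intro x hx
      rw [hsdef, PySem.List.mem_sorted, PySem.Set.mem_ofList] at hx
      have := List.mem_filter.mp hx
      exact of_decide_eq_true this.2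
    have hsp : List.Pairwise (· < ·) (0 :: (splits ++ [n])) := by
      refine List.pairwise_cons.mpr ⟨?_, ?_⟩
      · intro y hy
        rcases List.mem_append.mp hy with hy | hy
        · have := hmem y hy; omega
        · have : y = n := by simpa using hy
          omega
      · refine List.pairwise_append.mpr ⟨?_, by simp, ?_⟩
        · exact PySem.List.sorted_ofList_pairwise_lt _
        · intro x hx y hy
          have := hmem x hx
          have : y = n := by simpa using hy
          omega
    obtain ⟨hpw, _⟩ := pvG_sorted n max_len hm (splits ++ [n]) 0 hsp
    have hmono : ∀ j k : Nat, j < k → k < (pvG n max_len 0 (splits ++ [n])).length →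
        (pvG n max_len 0 (splits ++ [n])).getD j 0 < (pvG n max_len 0 (splits ++ [n])).getD k 0 := by
      intro j k hjk hk
      rw [List.getD_eq_getElem _ 0 (by omega), List.getD_eq_getElem _ 0 hk]
      exact List.pairwise_iff_getElem.mp hpw j k (by omega) hk hjk
    rw [hA, hB]
    rw [pvOuter_eq min_len (pvG n max_len 0 (splits ++ [n])) hmono _ 0 [] 0 (by omega)]
    rfl
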